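-- pv_equiv track=rewrite | github.com/g1tsys/coding | Day 3 - Score 100/418-word_master.py | can_spell
-- ===== SOURCE A (Python) =====
-- def can_spell(word, chars):
--     # 对chars中的每个字符进行计数
--     char_count = {}
--     for char in chars:
--         if char in char_count:
--             char_count[char] += 1
--         else:
--             char_count[char] = 1
--
--     # 检查word中的每个字符是否可以在chars中找到
--     for w in word:
--         if w in char_count and char_count[w] > 0:
--             char_count[w] -= 1
--         elif '?' in char_count and char_count['?'] > 0:
--             char_count['?'] -= 1
--         else:
--             # 如果word中的字符在chars中找不到，或者没有足够的'?'
--             # 则返回False，表示不能拼写出word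
--             return False
--     return True
-- ===== SOURCE B (Python) =====
-- def can_spell(word, chars):
--     wl = list(word)
--     cl = list(chars)
--     demand = wl.count('?')
--     for c in set(wl):
--         if c != '?':
--             demand += max(0, wl.count(c) - cl.count(c))
--     return demand <= cl.count('?')
-- ===== Notes on version B (the rewrite author's own statement) =====
-- stated objective: alternative
-- what changed: Replaces A's greedy left-to-right consumption of a mutable count dict (with early return) by an aggregate computation: total wildcard demand = count of '?' in word plus per-distinct-character shortfall max(0, word.count(c) - chars.count(c)), compared once against chars.count('?').
import Mathlib
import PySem

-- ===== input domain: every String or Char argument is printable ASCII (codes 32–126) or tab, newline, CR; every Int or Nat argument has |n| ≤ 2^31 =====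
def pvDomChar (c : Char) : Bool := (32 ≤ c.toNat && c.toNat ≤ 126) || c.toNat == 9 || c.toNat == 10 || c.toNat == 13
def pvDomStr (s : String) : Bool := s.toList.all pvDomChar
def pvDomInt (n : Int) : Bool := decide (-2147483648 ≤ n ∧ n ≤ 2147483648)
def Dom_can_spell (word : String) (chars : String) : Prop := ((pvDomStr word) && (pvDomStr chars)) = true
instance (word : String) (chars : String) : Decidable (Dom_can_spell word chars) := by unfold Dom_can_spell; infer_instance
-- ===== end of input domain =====

-- B replaces A's greedy consumption of a mutable count dict by an aggregate
-- shortfall comparison; equal return value on every input (alternative decomposition).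

-- ===== PORT A =====
-- A's second loop: scan word, consume a matching count or a '?' count, else False.
def canSpellLoop (d : PySem.Dict Char Int) (ws : List Char) : Bool :=
  match ws with
  | [] => true
  | w :: rest =>
    if d.contains w && decide (0 < d.getD w 0) then
      canSpellLoop (d.modify w 0 (· - 1)) rest
    else if d.contains '?' && decide (0 < d.getD '?' 0) then
      canSpellLoop (d.modify '?' 0 (· - 1)) rest
    else
      false

def can_spell (word : String) (chars : String) : Bool :=
  -- first loop: build char_count from chars
  let char_count : PySem.Dict Char Int :=
    chars.toList.foldl
      (fun d c => if d.contains c then d.modify c 0 (· + 1) else d.insert c 1)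
      PySem.Dict.empty
  canSpellLoop char_count word.toList

-- ===== PORT B =====
def can_spell_alt (word : String) (chars : String) : Bool :=
  let wl := word.toList
  let cl := chars.toList
  let demand : Int := (wl.count '?' : Int)
  let demand :=
    (PySem.Set.ofList wl).foldl
      (fun acc c => if c ≠ '?' then acc + max 0 ((wl.count c : Int) - (cl.count c : Int)) else acc)
      demand
  decide (demand ≤ (cl.count '?' : Int))

-- ===== PRECONDITION & SPEC =====
def Spec_can_spell (word : String) (chars : String) (out : Bool) : Prop := out = can_spell_alt word chars
instance (word : String) (chars : String) (out : Bool) : Decidable (Spec_can_spell word chars out) := by unfold Spec_can_spell; infer_instance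

-- ===== CLAIM (what is proved, stated in full; the proofs are below) =====
def Claim_equal_can_spell : Prop := ∀ (word : String) (chars : String), Dom_can_spell word chars → Spec_can_spell word chars (can_spell word chars)

-- ===== LEMMAS AND PROOFS =====

-- wildcard demand of ws against the counts in d ('?' entry of d is never consulted)
def Dem (d : PySem.Dict Char Int) (ws : List Char) : Int :=
  match ws with
  | [] => 0
  | w :: rest =>
    if w ≠ '?' ∧ 0 < d.getD w 0 then Dem (d.modify w 0 (· - 1)) rest
    else 1 + Dem d rest

theorem Dem_nonneg (ws : List Char) : ∀ d, 0 ≤ Dem d ws := by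
  induction ws with
  | nil => intro d; simp [Dem]
  | cons w rest ih =>
    intro d
    simp only [Dem]
    split
    · exact ih _
    · have := ih d; omega

theorem Dem_congr (ws : List Char) : ∀ d d', (∀ c, c ≠ '?' → d.getD c 0 = d'.getD c 0) →
    Dem d ws = Dem d' ws := by
  induction ws with
  | nil => intro d d' _; rfl
  | cons w rest ih =>
    intro d d' h
    simp only [Dem]
    by_cases hw : w = '?'
    · subst hw
      simp only [ne_eq, not_true_eq_false, false_and, if_false]
      rw [ih d d' h]
    · rw [h w hw]
      split
      · apply ih
        intro c hc
        rw [PySem.Dict.getD_modify, PySem.Dict.getD_modify, h w hw]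
        by_cases hcw : c = w <;> simp [hcw, h c hc]
      · rw [ih d d' h]

-- 0 < d[c] forces membership (absent keys read as the default 0)
theorem contains_of_getD_pos (d : PySem.Dict Char Int) (c : Char) (h : 0 < d.getD c 0) :
    d.contains c = true := by
  by_cases hc : d.contains c
  · exact hc
  · have hz := PySem.Dict.getD_of_not_contains d (k := c) (d0 := (0:Int)) (by simpa using hc)
    omega

theorem loop_eq (ws : List Char) : ∀ d, 0 ≤ d.getD '?' 0 →
    canSpellLoop d ws = decide (Dem d ws ≤ d.getD '?' 0) := by
  induction ws with
  | nil =>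
    intro d h
    simp [canSpellLoop, Dem, h]
  | cons w rest ih =>
    intro d h
    have hnn := Dem_nonneg rest d
    by_cases hpos : 0 < d.getD w 0
    · have hc := contains_of_getD_pos d w hpos
      by_cases hw : w = '?'
      · subst hw
        have h1 : 0 ≤ (d.modify '?' 0 (· - 1)).getD '?' 0 := by
          rw [PySem.Dict.getD_modify_self]; omega
        have h2 : Dem (d.modify '?' 0 (· - 1)) rest = Dem d rest := by
          apply Dem_congr
          intro c hcne
          rw [PySem.Dict.getD_modify]
          simp [hcne]
        simp only [canSpellLoop, hc, hpos, decide_true, Bool.and_self, if_true]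
        rw [ih _ h1, h2, PySem.Dict.getD_modify_self]
        simp only [Dem, ne_eq, not_true_eq_false, false_and, if_false]
        exact Bool.decide_congr (by omega)
      · have hqw : ('?' : Char) ≠ w := fun hh => hw hh.symm
        have h1 : 0 ≤ (d.modify w 0 (· - 1)).getD '?' 0 := by
          rw [PySem.Dict.getD_modify, if_neg hqw]; exact h
        simp only [canSpellLoop, hc, hpos, decide_true, Bool.and_self, if_true]
        rw [ih _ h1]
        rw [PySem.Dict.getD_modify, if_neg hqw]
        simp only [Dem, ne_eq, hw, not_false_eq_true, true_and, hpos, if_true]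
    · have hfb : (d.contains w && decide (0 < d.getD w 0)) = false := by
        simp [hpos]
      have hdem : Dem d (w :: rest) = 1 + Dem d rest := by
        simp only [Dem]
        rw [if_neg]; rintro ⟨-, hp⟩; exact hpos hp
      by_cases hq : 0 < d.getD '?' 0
      · have hcq := contains_of_getD_pos d '?' hq
        have h1 : 0 ≤ (d.modify '?' 0 (· - 1)).getD '?' 0 := by
          rw [PySem.Dict.getD_modify_self]; omega
        have h2 : Dem (d.modify '?' 0 (· - 1)) rest = Dem d rest := by
          apply Dem_congr
          intro c hcne
          rw [PySem.Dict.getD_modify]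
          simp [hcne]
        simp only [canSpellLoop, hfb, Bool.false_eq_true, if_false, hcq, hq, decide_true,
          Bool.and_self, if_true]
        rw [ih _ h1, h2, PySem.Dict.getD_modify_self, hdem]
        exact Bool.decide_congr (by omega)
      · have hq0 : d.getD '?' 0 = 0 := by omega
        have hsb : (d.contains '?' && decide (0 < d.getD '?' 0)) = false := by
          simp [hq]
        simp only [canSpellLoop, hfb, Bool.false_eq_true, if_false, hsb]
        rw [hdem, hq0]
        symm; simp; omega

-- closed form of Dem for nonnegative dicts
theorem Dem_closed (ws : List Char) : ∀ d : PySem.Dict Char Int, (∀ c, 0 ≤ d.getD c 0) →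
    Dem d ws = (ws.count '?' : Int) +
      ∑ c ∈ ws.toFinset.erase '?', max 0 ((ws.count c : Int) - d.getD c 0) := by
  induction ws with
  | nil => intro d _; simp [Dem]
  | cons w rest ih =>
    intro d hnn
    simp only [List.toFinset_cons]
    by_cases hw : w = '?'
    · subst hw
      simp only [Dem, ne_eq, not_true_eq_false, false_and, if_false]
      rw [ih d hnn, Finset.erase_insert_eq_erase, List.count_cons_self]
      have hsum : ∑ c ∈ rest.toFinset.erase '?',
            max 0 ((List.count c ('?' :: rest) : Int) - d.getD c 0)
          = ∑ c ∈ rest.toFinset.erase '?', max 0 ((List.count c rest : Int) - d.getD c 0) :=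
        Finset.sum_congr rfl (fun c hc => by
          rw [List.count_cons_of_ne (Ne.symm (Finset.mem_erase.mp hc).1)])
      rw [hsum]
      push_cast; ring
    · have hqw : ('?' : Char) ≠ w := fun hh => hw hh.symm
      have hset : (insert w rest.toFinset).erase '?' = insert w (rest.toFinset.erase '?') :=
        Finset.erase_insert_of_ne hw
      rw [hset, List.count_cons_of_ne hw]
      by_cases hpos : 0 < d.getD w 0
      · -- consume one w from d
        simp only [Dem, ne_eq, hw, not_false_eq_true, true_and, hpos, if_true]
        have hnn' : ∀ c, 0 ≤ (d.modify w 0 (· - 1)).getD c 0 := by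
          intro c; rw [PySem.Dict.getD_modify]
          split
          · next hcw => subst hcw; omega
          · exact hnn c
        rw [ih _ hnn']
        congr 1
        by_cases hwS : w ∈ rest.toFinset.erase '?'
        · rw [Finset.insert_eq_self.mpr hwS]
          apply Finset.sum_congr rfl
          intro c hc
          by_cases hcw : c = w
          · subst hcw
            rw [PySem.Dict.getD_modify_self, List.count_cons_self]
            push_cast; congr 1; ring
          · rw [PySem.Dict.getD_modify, if_neg hcw, List.count_cons_of_ne (Ne.symm hcw)]
        · rw [Finset.sum_insert hwS]
          have hwrest : w ∉ rest := fun hmem =>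
            hwS (Finset.mem_erase.mpr ⟨hw, List.mem_toFinset.mpr hmem⟩)
          have hterm : max 0 (((w :: rest).count w : Int) - d.getD w 0) = 0 := by
            rw [List.count_cons_self, List.count_eq_zero.mpr hwrest]
            simp; omega
          rw [hterm, zero_add]
          apply Finset.sum_congr rfl
          intro c hc
          have hcw : c ≠ w := fun hh => hwS (hh ▸ hc)
          rw [PySem.Dict.getD_modify, if_neg hcw, List.count_cons_of_ne (Ne.symm hcw)]
      · -- d has no w: every occurrence of w adds to the demand
        have hz : d.getD w 0 = 0 := le_antisymm (by omega) (hnn w)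
        simp only [Dem, ne_eq, hw, not_false_eq_true, true_and, hpos, if_false]
        rw [ih d hnn]
        have hgw : max 0 (((w :: rest).count w : Int) - d.getD w 0) =
            (rest.count w : Int) + 1 := by
          rw [hz, List.count_cons_self]
          push_cast; simp; omega
        have hcongr : ∀ c ∈ rest.toFinset.erase '?', c ≠ w →
            max 0 (((w :: rest).count c : Int) - d.getD c 0)
              = max 0 ((rest.count c : Int) - d.getD c 0) := by
          intro c _ hcw
          rw [List.count_cons_of_ne (Ne.symm hcw)]
        by_cases hwS : w ∈ rest.toFinset.erase '?'
        · rw [Finset.insert_eq_self.mpr hwS,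
            ← Finset.add_sum_erase _ (fun c => max 0 (((w :: rest).count c : Int) - d.getD c 0)) hwS,
            hgw,
            ← Finset.add_sum_erase _ (fun c => max 0 (((rest.count c : Int)) - d.getD c 0)) hwS]
          have hgw' : max 0 ((rest.count w : Int) - d.getD w 0) = (rest.count w : Int) := by
            rw [hz]; simp
          rw [hgw',
            Finset.sum_congr rfl (fun c hc => hcongr c (Finset.mem_of_mem_erase hc)
              (Finset.ne_of_mem_erase hc))]
          ring
        · rw [Finset.sum_insert hwS, hgw]
          have hwrest : w ∉ rest := fun hmem =>
            hwS (Finset.mem_erase.mpr ⟨hw, List.mem_toFinset.mpr hmem⟩)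
          have hcw0 : (rest.count w : Int) = 0 := by
            rw [List.count_eq_zero.mpr hwrest]; rfl
          rw [hcw0,
            Finset.sum_congr rfl (fun c hc => hcongr c hc (fun hh => hwS (hh ▸ hc)))]
          ring

-- A's counting loop builds exactly Counter(chars)
theorem counter_fold_eq (l : List Char) :
    l.foldl (fun d c => if d.contains c then d.modify c 0 (· + 1) else d.insert c 1)
      PySem.Dict.empty = PySem.Dict.counter l := by
  rw [PySem.Dict.counter_eq_foldl]
  apply PySem.List.foldl_congr_mem
  intro d c _
  by_cases h : d.contains c
  · simp [h]
  · have hz := PySem.Dict.getD_of_not_contains d (k := c) (d0 := (0:Int)) (by simpa using h)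
    simp [h, PySem.Dict.insert, PySem.Dict.modify, hz]

-- ===== VERDICT (by name: the statement is the Claim_ definition above) =====
theorem can_spell_spec : Claim_equal_can_spell := by
  intro word chars _
  unfold Spec_can_spell
  show can_spell word chars = can_spell_alt word chars
  simp only [can_spell, can_spell_alt, counter_fold_eq]
  have hnn : ∀ c, 0 ≤ (PySem.Dict.counter chars.toList).getD c 0 := by
    intro c; rw [PySem.Dict.getD_counter]; positivity
  rw [loop_eq _ _ (hnn '?'), Dem_closed _ _ hnn, PySem.Dict.getD_counter,
    PySem.List.foldl_ite_eq_foldl_filter, PySem.List.foldl_add]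
  congr 2
  have hnodup : ((PySem.Set.ofList word.toList).filter (fun c => decide (c ≠ '?'))).Nodup :=
    (PySem.Set.nodup_ofList word.toList).filter _
  have hfs : ((PySem.Set.ofList word.toList).filter (fun c => decide (c ≠ '?'))).toFinset
      = word.toList.toFinset.erase '?' := by
    ext c
    simp [PySem.Set.mem_ofList, Finset.mem_erase, and_comm]
  rw [← List.sum_toFinset _ hnodup, hfs]
  congr 1
  apply Finset.sum_congr rfl
  intro c _
  rw [PySem.Dict.getD_counter]
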